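-- pv_equiv track=rewrite | github.com/BlueEventHorizon/bw-cc-plugins | plugins/forge/skills/update-version/scripts/update_version_files.py | _update_with_filter
-- ===== SOURCE A (Python) =====
-- def _update_with_filter(content, old_version, new_version, filter_pattern,
--                         max_distance=10):
--     """フィルタパターンにマッチするブロック内のみ置換する。
--
--     Args:
--         content: ファイル内容
--         old_version: 置換元バージョン
--         new_version: 置換先バージョン
--         filter_pattern: フィルタパターン
--         max_distance: filter 行から version を探索する最大行数。
--                       この行数以内に version が見つからなければブロックをリセットする。
--     """
--     lines = content.split('\n')
--     in_block = False
--     lines_since_filter = 0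
--     result_lines = []
--     replaced = False
--
--     for line in lines:
--         if filter_pattern in line:
--             # 新しい filter マッチ: カウンタをリセットしてブロック開始
--             in_block = True
--             lines_since_filter = 0
--         elif in_block:
--             lines_since_filter += 1
--             if lines_since_filter > max_distance:
--                 # filter 行から一定行数以内に version が見つからなかった
--                 in_block = False
--
--         if in_block and not replaced and old_version in line:
--             line = line.replace(old_version, new_version, 1)
--             replaced = True
--             in_block = False
--
--         result_lines.append(line)
--
--     if not replaced:
--         raise ValueError(
--             f"フィルタ '{filter_pattern}' のブロック内にバージョン '{old_version}' が見つかりません"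
--         )
--
--     return '\n'.join(result_lines)
-- ===== SOURCE B (Python) =====
-- def _update_with_filter(content, old_version, new_version, filter_pattern,
--                         max_distance=10):
--     """Two-pass rewrite: build a distance-to-last-filter table, then patch the
--     first close-enough line containing old_version."""
--     lines = content.split('\n')
--
--     # Pass 1: dists[j] = number of lines between line j and the most recent
--     # line at-or-before j matching filter_pattern (None before any match).
--     dists = []
--     d = None
--     for line in lines:
--         d = 0 if filter_pattern in line else (None if d is None else d + 1)
--         dists.append(d)
--
--     # Pass 2: patch the first line that contains old_version and is either a
--     # filter line itself or within max_distance of the latest filter line.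
--     for j, line in enumerate(lines):
--         dj = dists[j]
--         if dj is not None and (dj == 0 or dj <= max_distance) and old_version in line:
--             lines[j] = line.replace(old_version, new_version, 1)
--             return '\n'.join(lines)
--
--     raise ValueError(
--         f"フィルタ '{filter_pattern}' のブロック内にバージョン '{old_version}' が見つかりません"
--     )
-- ===== Notes on version B (the rewrite author's own statement) =====
-- stated objective: alternative
-- what changed: Replaces A's single-pass in_block/lines_since_filter/replaced state machine by two independent passes: one pass builds a distance-to-most-recent-filter-line table, a second pass patches the first line that contains old_version and is a filter line or within max_distance of one.
import Mathlib
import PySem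

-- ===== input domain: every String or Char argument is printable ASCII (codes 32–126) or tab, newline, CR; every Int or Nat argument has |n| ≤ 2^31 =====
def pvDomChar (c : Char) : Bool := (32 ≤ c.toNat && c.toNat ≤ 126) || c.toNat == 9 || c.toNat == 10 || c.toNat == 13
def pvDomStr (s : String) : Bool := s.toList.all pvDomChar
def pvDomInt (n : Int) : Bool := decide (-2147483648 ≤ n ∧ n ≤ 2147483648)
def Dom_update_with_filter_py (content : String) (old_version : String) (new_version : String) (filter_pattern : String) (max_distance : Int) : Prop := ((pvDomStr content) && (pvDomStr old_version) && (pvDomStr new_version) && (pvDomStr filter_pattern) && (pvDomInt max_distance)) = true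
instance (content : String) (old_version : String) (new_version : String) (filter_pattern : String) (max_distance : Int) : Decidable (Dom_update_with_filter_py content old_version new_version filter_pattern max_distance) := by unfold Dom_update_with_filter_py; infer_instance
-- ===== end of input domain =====

-- ===== PORT A =====
-- B changes the single flag/counter state machine into a distance-table pass plus a search pass (objective: alternative decomposition, same cost).
-- shared hand-port of Python's  s.replace(old, new, 1)  (first occurrence only; old = "" prepends new) — exact via PySem.Chars.find
def pvReplaceOnce (s old new : String) : String :=
  let i := PySem.Chars.find s.toList old.toList
  if i = -1 then s
  else String.ofList (s.toList.take i.toNat ++ new.toList ++ s.toList.drop (i.toNat + old.toList.length))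

-- the body of A's for-loop (state = (in_block, lines_since_filter, result_lines, replaced))
def pvStepA (old_version new_version filter_pattern : String) (max_distance : Int)
    (st : Bool × Int × List String × Bool) (line : String) : Bool × Int × List String × Bool :=
  let in_block := st.1
  let lines_since_filter := st.2.1
  let result_lines := st.2.2.1
  let replaced := st.2.2.2
  let p : Bool × Int :=
    if PySem.Str.isIn filter_pattern line then (true, 0)
    else if in_block then
      let c := lines_since_filter + 1
      if c > max_distance then (false, c) else (true, c)
    else (in_block, lines_since_filter)
  if p.1 && !replaced && PySem.Str.isIn old_version line then
    (false, p.2, result_lines ++ [pvReplaceOnce line old_version new_version], true)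
  else
    (p.1, p.2, result_lines ++ [line], replaced)

def update_with_filter_py (content : String) (old_version : String) (new_version : String) (filter_pattern : String) (max_distance : Int) : String :=
  let lines := (PySem.Str.split? content "\n").getD []   -- sep is the literal "\n" ≠ "", so split? is always some
  let st := lines.foldl (pvStepA old_version new_version filter_pattern max_distance) (false, 0, [], false)
  if st.2.2.2 then PySem.Str.join "\n" st.2.2.1 else ""  -- "" stands for the ValueError path, excluded by Pre_

-- ===== PORT B =====
def update_with_filter_py_alt (content : String) (old_version : String) (new_version : String) (filter_pattern : String) (max_distance : Int) : String :=
  let lines := (PySem.Str.split? content "\n").getD []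
  -- pass 1: distance from each line to the most recent filter-matching line (none before any)
  let dists := (lines.foldl (fun (acc : List (Option Int) × Option Int) line =>
      let d := if PySem.Str.isIn filter_pattern line then some 0 else acc.2.map (· + 1)
      (acc.1 ++ [d], d)) ([], none)).1
  -- pass 2: patch the first line containing old_version that is a filter line or close enough to one
  match (lines.zip dists).findIdx? (fun ld =>
      match ld.2 with
      | none => false
      | some d => (d == 0 || decide (d ≤ max_distance)) && PySem.Str.isIn old_version ld.1) with
  | some j => PySem.Str.join "\n" (lines.modify j (fun l => pvReplaceOnce l old_version new_version))
  | none => ""  -- the ValueError path, excluded by Pre_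

-- ===== PRECONDITION & SPEC =====
-- Pre_: exactly the inputs where Python A returns (some line contains old_version and is a
-- filter-pattern line itself or within max_distance after one); outside it A raises ValueError.
def Pre_update_with_filter_py (content : String) (old_version : String) (new_version : String) (filter_pattern : String) (max_distance : Int) : Prop :=
  let lines := (PySem.Str.split? content "\n").getD []
  ∃ j < lines.length, PySem.Str.isIn old_version (lines.getD j "") = true ∧
    ∃ i ≤ j, PySem.Str.isIn filter_pattern (lines.getD i "") = true ∧
      (i = j ∨ (j : Int) - (i : Int) ≤ max_distance)
instance (content : String) (old_version : String) (new_version : String) (filter_pattern : String) (max_distance : Int) : Decidable (Pre_update_with_filter_py content old_version new_version filter_pattern max_distance) := by unfold Pre_update_with_filter_py; infer_instance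

def pvWitness_update_with_filter_py : String × String × String × String × Int :=
  ("version: 1.0\nother", "1.0", "2.0", "version", 10)

def Spec_update_with_filter_py (content : String) (old_version : String) (new_version : String) (filter_pattern : String) (max_distance : Int) (out : String) : Prop := out = update_with_filter_py_alt content old_version new_version filter_pattern max_distance
instance (content : String) (old_version : String) (new_version : String) (filter_pattern : String) (max_distance : Int) (out : String) : Decidable (Spec_update_with_filter_py content old_version new_version filter_pattern max_distance out) := by unfold Spec_update_with_filter_py; infer_instance

-- ===== CLAIM (what is proved, stated in full; the proofs are below) =====
def Claim_equal_update_with_filter_py : Prop := ∀ (content : String) (old_version : String) (new_version : String) (filter_pattern : String) (max_distance : Int), Dom_update_with_filter_py content old_version new_version filter_pattern max_distance → Pre_update_with_filter_py content old_version new_version filter_pattern max_distance → Spec_update_with_filter_py content old_version new_version filter_pattern max_distance (update_with_filter_py content old_version new_version filter_pattern max_distance)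

-- ===== LEMMAS AND PROOFS =====
-- proof-side clean forms: the distance scan, the qualifying test, and the search
def pvStep (fp : String) (d : Option Int) (line : String) : Option Int :=
  if PySem.Str.isIn fp line then some 0 else d.map (· + 1)

def pvScan (fp : String) : Option Int → List String → List (String × Option Int)
  | _, [] => []
  | d, l :: ls => let d' := pvStep fp d l; (l, d') :: pvScan fp d' ls

def pvQ (max : Int) : Option Int → Bool
  | none => false
  | some d => d == 0 || decide (d ≤ max)

def pvSearch (max : Int) (old new : String) : List (String × Option Int) → Option (List String)
  | [] => none
  | (l, d) :: rest =>
    if pvQ max d && PySem.Str.isIn old l then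
      some (pvReplaceOnce l old new :: rest.map Prod.fst)
    else (pvSearch max old new rest).map (l :: ·)

-- the relation between A's (in_block, lines_since_filter) and the clean distance
def pvInv (max : Int) (ib : Bool) (dA : Int) (d : Option Int) : Prop :=
  match d with
  | none => ib = false
  | some v => 0 ≤ v ∧ ib = pvQ max (some v) ∧ (ib = true → dA = v)

theorem pvScan_map_fst (fp : String) (d : Option Int) (ls : List String) :
    (pvScan fp d ls).map Prod.fst = ls := by
  induction ls generalizing d with
  | nil => rfl
  | cons l ls ih => simp [pvScan, ih]

theorem pvFoldA_replaced (old new fp : String) (max : Int) :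
    ∀ (ls : List String) (ib : Bool) (dA : Int) (acc : List String),
      (ls.foldl (pvStepA old new fp max) (ib, dA, acc, true)).2.2 = (acc ++ ls, true) := by
  intro ls
  induction ls with
  | nil => intro ib dA acc; simp
  | cons l ls ih =>
    intro ib dA acc
    show ((l :: ls).foldl (pvStepA old new fp max) (ib, dA, acc, true)).2.2 = _
    rw [List.foldl_cons]
    have hstep : pvStepA old new fp max (ib, dA, acc, true) l =
        ((pvStepA old new fp max (ib, dA, acc, true) l).1,
         (pvStepA old new fp max (ib, dA, acc, true) l).2.1, acc ++ [l], true) := by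
      simp [pvStepA]
    rw [hstep, ih]
    simp

theorem pvQ_some (max v : Int) : pvQ max (some v) = true ↔ (v = 0 ∨ v ≤ max) := by
  simp [pvQ]

theorem pvStepA_char (max : Int) (o n fp : String) (ib : Bool) (dA : Int) (d : Option Int)
    (l : String) (acc : List String) (h : pvInv max ib dA d) :
    ∃ b2 d2, b2 = pvQ max (pvStep fp d l) ∧ pvInv max b2 d2 (pvStep fp d l) ∧
      pvStepA o n fp max (ib, dA, acc, false) l =
        if pvQ max (pvStep fp d l) && PySem.Str.isIn o l then
          (false, d2, acc ++ [pvReplaceOnce l o n], true)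
        else (b2, d2, acc ++ [l], false) := by
  unfold pvStepA
  dsimp only
  simp only [Bool.not_false, Bool.and_true]
  cases hf : PySem.Str.isIn fp l with
  | true =>
    have hs : pvStep fp d l = some 0 := by unfold pvStep; rw [if_pos hf]
    have hq0 : pvQ max (some 0) = true := by simp [pvQ]
    rw [if_pos rfl, hs]
    refine ⟨true, 0, hq0.symm, ?_, ?_⟩
    · dsimp only [pvInv]
      exact ⟨le_refl 0, hq0.symm, fun _ => rfl⟩
    · by_cases hio : PySem.Str.isIn o l = true <;> simp [hio, hq0]
  | false =>
    have hfc : ¬ (PySem.Str.isIn fp l = true) := by rw [hf]; simp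
    have hs : pvStep fp d l = d.map (· + 1) := by unfold pvStep; rw [if_neg hfc]
    rw [if_neg (show ¬(false = true) by simp), hs]
    cases d with
    | none =>
      dsimp only [pvInv] at h
      subst h
      rw [if_neg (show ¬(false = true) by simp)]
      simp only [Option.map_none]
      refine ⟨false, dA, by simp [pvQ], by dsimp only [pvInv], ?_⟩
      by_cases hio : PySem.Str.isIn o l = true <;> simp [hio, pvQ]
    | some v =>
      dsimp only [pvInv] at h
      obtain ⟨hv, hib, hdA⟩ := h
      simp only [Option.map_some]
      by_cases hb : ib = true
      · have hdv : dA = v := hdA hb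
        subst hdv
        have hvq : dA = 0 ∨ dA ≤ max := (pvQ_some max dA).mp (by rw [hb] at hib; exact hib.symm)
        rw [if_pos hb]
        by_cases hc : dA + 1 > max
        · have h1 : pvQ max (some (dA + 1)) = false := by
            rw [Bool.eq_false_iff]; intro hh
            rcases (pvQ_some max (dA + 1)).mp hh with h' | h' <;> omega
          rw [if_pos hc]
          exact ⟨false, dA + 1, h1.symm, ⟨by omega, h1.symm, by simp⟩, by by_cases hio : PySem.Str.isIn o l = true <;> simp [hio, h1]⟩
        · have h1 : pvQ max (some (dA + 1)) = true := (pvQ_some max (dA + 1)).mpr (by omega)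
          rw [if_neg hc]
          exact ⟨true, dA + 1, h1.symm, ⟨by omega, h1.symm, fun _ => rfl⟩, by by_cases hio : PySem.Str.isIn o l = true <;> simp [hio, h1]⟩
      · have hb' : ib = false := by simpa using hb
        subst hb'
        have hvq : ¬ (v = 0 ∨ v ≤ max) := by
          intro hh
          have := (pvQ_some max v).mpr hh
          rw [← hib] at this
          exact Bool.false_ne_true this
        have h1 : pvQ max (some (v + 1)) = false := by
          rw [Bool.eq_false_iff]; intro hh
          rcases (pvQ_some max (v + 1)).mp hh with h' | h' <;> omega
        rw [if_neg (show ¬(false = true) by simp)]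
        exact ⟨false, dA, h1.symm, ⟨by omega, h1.symm, by simp⟩, by by_cases hio : PySem.Str.isIn o l = true <;> simp [hio, h1]⟩

theorem pvMain (max : Int) (old new fp : String) :
    ∀ (ls : List String) (d : Option Int) (ib : Bool) (dA : Int) (acc : List String),
      pvInv max ib dA d →
      (match pvSearch max old new (pvScan fp d ls) with
       | some out =>
          (ls.foldl (pvStepA old new fp max) (ib, dA, acc, false)).2.2 = (acc ++ out, true)
       | none =>
          (ls.foldl (pvStepA old new fp max) (ib, dA, acc, false)).2.2 = (acc ++ ls, false)) := by
  intro ls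
  induction ls with
  | nil =>
    intro d ib dA acc h
    dsimp only [pvScan, pvSearch]
    simp
  | cons l ls ih =>
    intro d ib dA acc h
    obtain ⟨b2, d2, hb2, hinv, hstep⟩ := pvStepA_char max old new fp ib dA d l acc h
    have hscan : pvScan fp d (l :: ls) = (l, pvStep fp d l) :: pvScan fp (pvStep fp d l) ls := rfl
    rw [hscan]
    by_cases hq : (pvQ max (pvStep fp d l) && PySem.Str.isIn old l) = true
    · have hsearch : pvSearch max old new ((l, pvStep fp d l) :: pvScan fp (pvStep fp d l) ls) =
          some (pvReplaceOnce l old new :: ls) := by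
        unfold pvSearch
        rw [if_pos hq, pvScan_map_fst]
      rw [hsearch]
      dsimp only
      rw [List.foldl_cons, hstep, if_pos hq, pvFoldA_replaced]
      simp
    · have hq' : (pvQ max (pvStep fp d l) && PySem.Str.isIn old l) = false := by
        simpa using hq
      have hsearch : pvSearch max old new ((l, pvStep fp d l) :: pvScan fp (pvStep fp d l) ls) =
          (pvSearch max old new (pvScan fp (pvStep fp d l) ls)).map (l :: ·) := by
        conv_lhs => rw [pvSearch]
        rw [if_neg hq]
      rw [hsearch, List.foldl_cons, hstep, if_neg hq]
      have IH := ih (pvStep fp d l) b2 d2 (acc ++ [l]) hinv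
      cases hs : pvSearch max old new (pvScan fp (pvStep fp d l) ls) with
      | none =>
        rw [hs] at IH
        dsimp only at IH ⊢
        simp only [Option.map_none]
        rw [IH]
        simp
      | some out =>
        rw [hs] at IH
        dsimp only at IH ⊢
        simp only [Option.map_some]
        rw [IH]
        simp

theorem pvA_canonical (c o n f : String) (m : Int) :
    update_with_filter_py c o n f m =
      match pvSearch m o n (pvScan f none ((PySem.Str.split? c "\n").getD [])) with
      | some out => PySem.Str.join "\n" out
      | none => "" := by
  unfold update_with_filter_py
  dsimp only
  have H := pvMain m o n f ((PySem.Str.split? c "\n").getD []) none false 0 []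
    (by dsimp only [pvInv])
  cases hs : pvSearch m o n (pvScan f none ((PySem.Str.split? c "\n").getD [])) with
  | some out =>
    rw [hs] at H
    dsimp only at H ⊢
    rw [congrArg Prod.snd H, congrArg Prod.fst H]
    simp
  | none =>
    rw [hs] at H
    dsimp only at H ⊢
    rw [congrArg Prod.snd H]
    simp

theorem pvPass1 (fp : String) :
    ∀ (ls : List String) (acc : List (Option Int)) (d : Option Int),
      (ls.foldl (fun (acc : List (Option Int) × Option Int) line =>
          let dd := if PySem.Str.isIn fp line then some 0 else acc.2.map (· + 1)
          (acc.1 ++ [dd], dd)) (acc, d)).1 = acc ++ (pvScan fp d ls).map Prod.snd := by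
  intro ls
  induction ls with
  | nil => intro acc d; simp [pvScan]
  | cons l ls ih =>
    intro acc d
    rw [List.foldl_cons]
    show (ls.foldl _ (acc ++ [pvStep fp d l], pvStep fp d l)).1 = _
    rw [ih]
    simp [pvScan]

theorem pvSearch_eq_findIdx (max : Int) (old new : String) :
    ∀ (pairs : List (String × Option Int)),
      pvSearch max old new pairs =
        match pairs.findIdx? (fun ld =>
            match ld.2 with
            | none => false
            | some d => (d == 0 || decide (d ≤ max)) && PySem.Str.isIn old ld.1) with
        | some j => some ((pairs.map Prod.fst).modify j (fun l => pvReplaceOnce l old new))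
        | none => none := by
  have hpred : ∀ (ld : String × Option Int),
      (match ld.2 with
       | none => false
       | some d => (d == 0 || decide (d ≤ max)) && PySem.Str.isIn old ld.1) =
      (pvQ max ld.2 && PySem.Str.isIn old ld.1) := by
    rintro ⟨a, b⟩
    cases b <;> simp [pvQ]
  intro pairs
  induction pairs with
  | nil => rfl
  | cons p rest ih =>
    obtain ⟨l, dv⟩ := p
    rw [List.findIdx?_cons]
    conv_lhs => rw [pvSearch]
    rw [hpred (l, dv)]
    dsimp only
    by_cases hq : (pvQ max dv && PySem.Str.isIn old l) = true
    · rw [if_pos hq, if_pos hq]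
      dsimp only [List.map_cons]
      rw [List.modify_zero_cons]
    · rw [if_neg hq, if_neg hq, ih]
      cases hj : rest.findIdx? (fun ld =>
          match ld.2 with
          | none => false
          | some d => (d == 0 || decide (d ≤ max)) && PySem.Str.isIn old ld.1) with
      | none => rfl
      | some j =>
        dsimp only [Option.map_some, List.map_cons]
        rw [List.modify_succ_cons]

theorem pvB_canonical (c o n f : String) (m : Int) :
    update_with_filter_py_alt c o n f m =
      match pvSearch m o n (pvScan f none ((PySem.Str.split? c "\n").getD [])) with
      | some out => PySem.Str.join "\n" out
      | none => "" := by
  unfold update_with_filter_py_alt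
  dsimp only
  rw [pvPass1 f ((PySem.Str.split? c "\n").getD []) [] none, List.nil_append]
  rw [show ((PySem.Str.split? c "\n").getD []).zip
        ((pvScan f none ((PySem.Str.split? c "\n").getD [])).map Prod.snd) =
      pvScan f none ((PySem.Str.split? c "\n").getD []) from by
    nth_rewrite 1 [(pvScan_map_fst f none ((PySem.Str.split? c "\n").getD [])).symm]
    exact Eq.symm (List.zip_of_prod rfl rfl)]
  rw [pvSearch_eq_findIdx]
  cases hj : (pvScan f none ((PySem.Str.split? c "\n").getD [])).findIdx? (fun ld =>
      match ld.2 with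
      | none => false
      | some d => (d == 0 || decide (d ≤ m)) && PySem.Str.isIn o ld.1) with
  | none => rfl
  | some j =>
    dsimp only
    rw [pvScan_map_fst]

-- ===== VERDICT (by name: the statement is the Claim_ definition above) =====
theorem update_with_filter_py_spec : Claim_equal_update_with_filter_py := by
  intro c o n f m _ _
  unfold Spec_update_with_filter_py
  rw [pvA_canonical, pvB_canonical]
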